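-- pv_equiv track=rewrite | github.com/nicolasgoyena/hiblooms | pages/2_Data_Catalog.py | pick_display_fields
-- ===== SOURCE A (Python) =====
-- from typing import Any, Dict, List, Optional, Tuple
--
-- def pick_display_fields(cols: List[Dict[str, Any]]) -> List[str]:
--     names = [c["name"] for c in cols]
--     priority = ["name","title","sample_id","reservoir","reservoir_name","point_name","type","category","date","created_at"]
--     chosen = [c for c in priority if c in names]
--     for n in names:
--         if n not in chosen and len(chosen) < 5:
--             chosen.append(n)
--     return chosen[:5]
-- ===== SOURCE B (Python) =====
-- from typing import Any, Dict, List
--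
-- def pick_display_fields(cols: List[Dict[str, Any]]) -> List[str]:
--     priority = ["name","title","sample_id","reservoir","reservoir_name","point_name","type","category","date","created_at"]
--     rank = {name: i for i, name in enumerate(priority)}
--     uniq = list(dict.fromkeys(c["name"] for c in cols))
--     return sorted(uniq, key=lambda n: rank.get(n, len(priority)))[:5]
-- ===== Notes on version B (the rewrite author's own statement) =====
-- stated objective: idiomatic
-- what changed: Replaces A's priority-filter pass plus a stateful append loop (membership test against the growing 'chosen' list and a length<5 guard) by a rank dict, an ordered dedup via dict.fromkeys, and one stable sort keyed by rank.get(name, len(priority)), sliced to [:5].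
import Mathlib
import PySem

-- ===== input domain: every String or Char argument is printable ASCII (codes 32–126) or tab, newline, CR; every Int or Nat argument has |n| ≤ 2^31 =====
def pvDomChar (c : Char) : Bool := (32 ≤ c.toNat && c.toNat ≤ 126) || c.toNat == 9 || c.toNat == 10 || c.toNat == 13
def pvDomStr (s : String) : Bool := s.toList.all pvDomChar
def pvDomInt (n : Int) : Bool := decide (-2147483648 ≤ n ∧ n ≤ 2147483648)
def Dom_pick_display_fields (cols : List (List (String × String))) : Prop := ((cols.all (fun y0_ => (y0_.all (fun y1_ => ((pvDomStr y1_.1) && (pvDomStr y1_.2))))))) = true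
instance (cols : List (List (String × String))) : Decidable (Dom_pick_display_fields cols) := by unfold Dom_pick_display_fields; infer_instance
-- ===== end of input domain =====

-- B picks the same up-to-5 display fields via a rank dict, an ordered dedup and one stable sort (idiomatic rewrite, same cost).
-- Pre_ excludes inputs where some column dict lacks the key "name": there the Python A raises KeyError (and so does B).


-- the priority list, shared verbatim by both Pythons
def pvPriority : List String :=
  ["name","title","sample_id","reservoir","reservoir_name","point_name","type","category","date","created_at"]

-- ===== PORT A =====
def pick_display_fields (cols : List (List (String × String))) : List String :=
  let names := cols.map (fun c => ((PySem.Dict.mk c).get? "name").getD "")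
  let chosen := pvPriority.filter (fun c => names.contains c)
  let chosen := names.foldl (fun ch n => if ¬ ch.contains n ∧ ch.length < 5 then ch ++ [n] else ch) chosen
  chosen.take 5

-- ===== PORT B =====
def pick_display_fields_alt (cols : List (List (String × String))) : List String :=
  let rank : PySem.Dict String Int :=
    (PySem.List.enumerate pvPriority).foldl (fun d p => d.insert p.2 p.1) PySem.Dict.empty
  let uniq := PySem.List.dedup (cols.map (fun c => ((PySem.Dict.mk c).get? "name").getD ""))
  (PySem.List.sorted uniq (fun n => rank.getD n (pvPriority.length : Int)) false).take 5

-- ===== PRECONDITION & SPEC =====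
-- Pre_ excludes exactly the inputs where some column dict has no "name" key: Python A raises KeyError there.
def Pre_pick_display_fields (cols : List (List (String × String))) : Prop :=
  ∀ c ∈ cols, "name" ∈ c.map Prod.fst

instance (cols : List (List (String × String))) : Decidable (Pre_pick_display_fields cols) := by
  unfold Pre_pick_display_fields; infer_instance

def pvWitness_pick_display_fields : (List (List (String × String))) :=
  [[("name", "date"), ("unit", "m")], [("name", "x")]]

def Spec_pick_display_fields (cols : List (List (String × String))) (out : List String) : Prop := out = pick_display_fields_alt cols
instance (cols : List (List (String × String))) (out : List String) : Decidable (Spec_pick_display_fields cols out) := by unfold Spec_pick_display_fields; infer_instance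

-- ===== CLAIM (what is proved, stated in full; the proofs are below) =====
def Claim_equal_pick_display_fields : Prop := ∀ (cols : List (List (String × String))), Dom_pick_display_fields cols → Pre_pick_display_fields cols → Spec_pick_display_fields cols (pick_display_fields cols)

-- ===== LEMMAS AND PROOFS =====

-- the key B sorts by, as a named function
def pvKey (n : String) : Int :=
  (((PySem.List.enumerate pvPriority).foldl (fun d p => d.insert p.2 p.1) PySem.Dict.empty).getD n
    (pvPriority.length : Int))

theorem pvKey_of_mem : ∀ j : Fin 10, ∀ _ : (j : Nat) < pvPriority.length,
    pvKey (pvPriority[(j : Nat)]) = (j : Nat) := by decide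

theorem pvKey_take : ∀ j : Fin 10, ∀ p ∈ pvPriority.take j, pvKey p < (j:Nat) := by decide

theorem pvKey_drop : ∀ j : Fin 10, ∀ p ∈ pvPriority.drop ((j:Nat)+1), (j:Nat) < pvKey p := by decide

theorem pvKey_lt_ten (p : String) (h : p ∈ pvPriority) : pvKey p < 10 := by
  fin_cases h <;> decide

theorem pvKey_of_not_mem (n : String) (h : n ∉ pvPriority) : pvKey n = 10 := by
  simp [pvPriority, List.mem_cons] at h
  push_neg at h
  obtain ⟨h1,h2,h3,h4,h5,h6,h7,h8,h9,h10⟩ := h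
  have e1 : ("name" == n) = false := beq_eq_false_iff_ne.mpr (Ne.symm h1)
  have e2 : ("title" == n) = false := beq_eq_false_iff_ne.mpr (Ne.symm h2)
  have e3 : ("sample_id" == n) = false := beq_eq_false_iff_ne.mpr (Ne.symm h3)
  have e4 : ("reservoir" == n) = false := beq_eq_false_iff_ne.mpr (Ne.symm h4)
  have e5 : ("reservoir_name" == n) = false := beq_eq_false_iff_ne.mpr (Ne.symm h5)
  have e6 : ("point_name" == n) = false := beq_eq_false_iff_ne.mpr (Ne.symm h6)
  have e7 : ("type" == n) = false := beq_eq_false_iff_ne.mpr (Ne.symm h7)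
  have e8 : ("category" == n) = false := beq_eq_false_iff_ne.mpr (Ne.symm h8)
  have e9 : ("date" == n) = false := beq_eq_false_iff_ne.mpr (Ne.symm h9)
  have e10 : ("created_at" == n) = false := beq_eq_false_iff_ne.mpr (Ne.symm h10)
  simp [pvKey, pvPriority, PySem.List.enumerate, PySem.Dict.getD, PySem.Dict.get?,
    PySem.Dict.insert, PySem.Dict.empty, List.find?, List.foldl,
    e1,e2,e3,e4,e5,e6,e7,e8,e9,e10]

-- PySem.List.insertBy is a transparent structural definition; three facts about where it inserts
theorem insertBy_append_not {α : Type} (bef : α → α → Bool) (x : α) (L1 L2 : List α)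
    (h : ∀ y ∈ L1, bef x y = false) :
    PySem.List.insertBy bef x (L1 ++ L2) = L1 ++ PySem.List.insertBy bef x L2 := by
  induction L1 with
  | nil => simp
  | cons a t ih =>
    have ha : bef x a = false := h a (by simp)
    simp only [List.cons_append, PySem.List.insertBy, ha]
    simp [ih (fun y hy => h y (by simp [hy]))]

theorem insertBy_all_true {α : Type} (bef : α → α → Bool) (x : α) (L : List α)
    (h : ∀ y ∈ L, bef x y = true) :
    PySem.List.insertBy bef x L = x :: L := by
  cases L with
  | nil => rfl
  | cons a t => simp [PySem.List.insertBy, h a (by simp)]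

theorem insertBy_all_false {α : Type} (bef : α → α → Bool) (x : α) (L : List α)
    (h : ∀ y ∈ L, bef x y = false) :
    PySem.List.insertBy bef x L = L ++ [x] := by
  induction L with
  | nil => rfl
  | cons a t ih =>
    simp only [PySem.List.insertBy, h a (by simp)]
    simp [ih (fun y hy => h y (by simp [hy]))]

-- A's append loop: once the accumulator has length ≥ 5 it never changes
theorem loopA_const (t : List String) (ch : List String) (h : 5 ≤ ch.length) :
    t.foldl (fun ch n => if ¬ ch.contains n ∧ ch.length < 5 then ch ++ [n] else ch) ch = ch := by
  induction t with
  | nil => rfl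
  | cons n t ih => simp only [List.foldl_cons]; rw [if_neg (by omega)]; exact ih

-- simulation: a Set.add fold from acc₁ appends exactly the elements a fold from acc₂ appends,
-- filtered by the predicate q that (on the traversed elements) characterises membership in acc₁
theorem foldl_add_sim {α : Type} [BEq α] [LawfulBEq α] (t : List α) (acc₁ acc₂ : List α)
    (q : α → Bool) (h : ∀ y ∈ t, (y ∈ acc₁ ↔ (y ∈ acc₂ ∨ q y = true))) :
    ∃ E, t.foldl PySem.Set.add acc₂ = acc₂ ++ E ∧
      t.foldl PySem.Set.add acc₁ = acc₁ ++ E.filter (fun y => !q y) := by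
  induction t generalizing acc₁ acc₂ with
  | nil => exact ⟨[], by simp⟩
  | cons y t ih =>
    by_cases h2 : y ∈ acc₂
    · have h1 : y ∈ acc₁ := (h y (by simp)).2 (Or.inl h2)
      obtain ⟨E, hE2, hE1⟩ := ih acc₁ acc₂ (fun z hz => h z (by simp [hz]))
      exact ⟨E, by simp [PySem.Set.add_of_mem h2, hE2], by simp [PySem.Set.add_of_mem h1, hE1]⟩
    · by_cases hq : q y = true
      · have h1 : y ∈ acc₁ := (h y (by simp)).2 (Or.inr hq)
        obtain ⟨E, hE2, hE1⟩ := ih acc₁ (acc₂ ++ [y]) (fun z hz => by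
          constructor
          · intro hz1; rcases (h z (by simp [hz])).1 hz1 with hc | hc
            · exact Or.inl (by simp [hc])
            · exact Or.inr hc
          · intro hc; rcases hc with hc | hc
            · rcases List.mem_append.1 hc with hc' | hc'
              · exact (h z (by simp [hz])).2 (Or.inl hc')
              · simp at hc'; subst hc'; exact h1
            · exact (h z (by simp [hz])).2 (Or.inr hc))
        refine ⟨y :: E, ?_, ?_⟩
        · simp [PySem.Set.add_of_not_mem h2, hE2]
        · simp [PySem.Set.add_of_mem h1, hE1, hq]
      · have h1 : y ∉ acc₁ := by
          intro hc; rcases (h y (by simp)).1 hc with hc' | hc' <;> simp_all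
        obtain ⟨E, hE2, hE1⟩ := ih (acc₁ ++ [y]) (acc₂ ++ [y]) (fun z hz => by
          by_cases hzy : z = y
          · subst hzy; simp
          · simp only [List.mem_append, List.mem_singleton, hzy, or_false]
            exact h z (by simp [hz]))
        refine ⟨y :: E, ?_, ?_⟩
        · simp [PySem.Set.add_of_not_mem h2, hE2]
        · simp only [List.foldl_cons, PySem.Set.add_of_not_mem h1, hE1, List.filter_cons, hq]
          simp

theorem foldl_add_prefix {α : Type} [BEq α] [LawfulBEq α] (t : List α) (acc : List α) :
    ∃ E, t.foldl PySem.Set.add acc = acc ++ E := by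
  obtain ⟨E, h1, _⟩ := foldl_add_sim t acc acc (fun _ => false) (fun y _ => by simp)
  exact ⟨E, h1⟩

-- up to the first 5 elements, A's guarded loop agrees with the unguarded dedup-append fold
theorem loopA_eq_add (t : List String) (ch : List String) :
    (t.foldl (fun ch n => if ¬ ch.contains n ∧ ch.length < 5 then ch ++ [n] else ch) ch).take 5 =
      (t.foldl PySem.Set.add ch).take 5 := by
  induction t generalizing ch with
  | nil => rfl
  | cons n t ih =>
    simp only [List.foldl_cons]
    by_cases hc : ch.contains n
    · rw [if_neg (fun h' => h'.1 hc), PySem.Set.add_of_mem (by simpa using hc)]; exact ih ch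
    · by_cases hl : ch.length < 5
      · rw [if_pos ⟨hc, hl⟩, PySem.Set.add_of_not_mem (by simpa using hc)]; exact ih _
      · rw [if_neg (fun h' => hl h'.2)]
        rw [loopA_const t ch (by omega)]
        obtain ⟨E, hE⟩ := foldl_add_prefix t (PySem.Set.add ch n)
        rw [hE, PySem.Set.add_of_not_mem (by simpa using hc)]
        rw [List.append_assoc, List.take_append_of_le_length (by omega)]

-- the stable sort by pvKey of a duplicate-free list: priority fields first, in priority order,
-- then the remaining names in their original relative order
theorem sorted_key_eq (u : List String) (hu : u.Nodup) :
    PySem.List.sorted u (fun n => pvKey n) false =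
      pvPriority.filter (fun p => u.contains p) ++ u.filter (fun n => !pvPriority.contains n) := by
  induction u using List.reverseRecOn with
  | nil => simp [PySem.List.sorted]
  | append_singleton u x ih =>
    have hnd : u.Nodup := (List.nodup_append.1 hu).1
    have hxu : x ∉ u := by
      have hu' : (x :: (u ++ [])).Nodup := List.nodup_middle.mp (by simpa using hu)
      simpa using (List.nodup_cons.1 hu').1
    rw [PySem.List.sorted_eq_foldl_insertBy, List.foldl_append, List.foldl_cons, List.foldl_nil,
        ← PySem.List.sorted_eq_foldl_insertBy, ih hnd]
    have hB : (u ++ [x]).filter (fun n => !pvPriority.contains n) =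
        u.filter (fun n => !pvPriority.contains n) ++
          (if pvPriority.contains x then [] else [x]) := by
      rw [List.filter_append]
      by_cases hxP : x ∈ pvPriority
      · simp [hxP]
      · simp [hxP]
    by_cases hxP : x ∈ pvPriority
    · -- x is a priority name
      obtain ⟨k, hk⟩ := Option.isSome_iff_exists.1 ((PySem.List.index?_isSome_iff pvPriority x).2 hxP)
      obtain ⟨pre, suf, hP, hlen, hxpre⟩ := (PySem.List.index?_eq_some_iff _ _ _).1 hk
      have h10 : pre.length + suf.length + 1 = 10 := by
        have := congrArg List.length hP
        simp [pvPriority] at this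
        omega
      have hk10 : k < 10 := by omega
      have hpre : pre = pvPriority.take k := by rw [hP, ← hlen, List.take_left]
      have hsuf : suf = pvPriority.drop (k+1) := by
        have h1 : pvPriority = (pre ++ [x]) ++ suf := by rw [hP]; simp
        rw [h1, show k + 1 = (pre ++ [x]).length by simp [hlen], List.drop_left]
      have hxsuf : x ∉ suf := by
        have hnd' : pvPriority.Nodup := by decide
        rw [hP] at hnd'
        exact (List.nodup_cons.1 (List.nodup_append.1 hnd').2.1).1
      have hkx : pvKey x = (k : Int) := by
        obtain ⟨hklt, hgk, -⟩ := PySem.List.getElem_of_index?_eq_some hk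
        have := pvKey_of_mem ⟨k, by simpa [pvPriority] using hklt⟩ hklt
        simpa [hgk] using this
      have hprekey : ∀ p ∈ pre, pvKey p < (k : Int) := by
        intro p hp
        simpa using pvKey_take ⟨k, hk10⟩ p (by rw [← hpre]; exact hp)
      have hsufkey : ∀ p ∈ suf, (k : Int) < pvKey p := by
        intro p hp
        simpa using pvKey_drop ⟨k, hk10⟩ p (by rw [← hsuf]; exact hp)
      have hA : pvPriority.filter (fun p => u.contains p) =
          pre.filter (fun p => u.contains p) ++ suf.filter (fun p => u.contains p) := by
        conv_lhs => rw [hP]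
        rw [List.filter_append, List.filter_cons]
        simp [hxu]
      have hA' : pvPriority.filter (fun p => (u ++ [x]).contains p) =
          pre.filter (fun p => u.contains p) ++ x :: suf.filter (fun p => u.contains p) := by
        conv_lhs => rw [hP]
        rw [List.filter_append, List.filter_cons]
        have hpre' : pre.filter (fun p => (u ++ [x]).contains p) =
            pre.filter (fun p => u.contains p) :=
          List.filter_congr (fun p hp =>
            Bool.coe_iff_coe.mp (by simp [show p ≠ x from fun hc => hxpre (hc ▸ hp)]))
        have hsuf' : suf.filter (fun p => (u ++ [x]).contains p) =
            suf.filter (fun p => u.contains p) :=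
          List.filter_congr (fun p hp =>
            Bool.coe_iff_coe.mp (by simp [show p ≠ x from fun hc => hxsuf (hc ▸ hp)]))
        rw [if_pos (by simp)]
        rw [hpre', hsuf']
      rw [hA, List.append_assoc]
      rw [insertBy_append_not _ _ _ _ (by
        intro y hy
        have := hprekey y (List.mem_of_mem_filter hy)
        simp only [decide_eq_false_iff_not, not_lt, hkx]
        omega)]
      rw [insertBy_all_true _ _ _ (by
        intro y hy
        simp only [List.mem_append] at hy
        have hky : (k : Int) < pvKey y := by
          rcases hy with hy | hy
          · exact hsufkey y (List.mem_of_mem_filter hy)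
          · have : ¬ (pvPriority.contains y = true) := by simpa using (List.of_mem_filter hy)
            rw [pvKey_of_not_mem y (by simpa using this)]
            omega
        simp only [decide_eq_true_eq, hkx]
        exact hky)]
      rw [hA', hB, if_pos (by simpa using hxP)]
      simp
    · -- x is not a priority name: it is inserted after everything
      have hkx : pvKey x = 10 := pvKey_of_not_mem x hxP
      rw [insertBy_all_false _ _ _ (by
        intro y hy
        simp only [List.mem_append] at hy
        have hy10 : pvKey y ≤ 10 := by
          rcases hy with hy | hy
          · exact le_of_lt (pvKey_lt_ten y (List.mem_of_mem_filter hy))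
          · have : ¬ (pvPriority.contains y = true) := by simpa using (List.of_mem_filter hy)
            rw [pvKey_of_not_mem y (by simpa using this)]
        simp [hkx]
        omega)]
      have hA : pvPriority.filter (fun p => (u ++ [x]).contains p) =
          pvPriority.filter (fun p => u.contains p) := by
        apply List.filter_congr
        intro p hp
        have hpx : p ≠ x := fun hc => hxP (hc ▸ hp)
        apply Bool.coe_iff_coe.mp
        simp [hpx]
      rw [hA, hB, if_neg (by simpa using hxP)]
      simp

-- the two ports agree on every input
theorem pick_eq_alt (cols : List (List (String × String))) :
    pick_display_fields cols = pick_display_fields_alt cols := by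
  show (let names := cols.map (fun c => ((PySem.Dict.mk c).get? "name").getD "")
        let chosen := pvPriority.filter (fun c => names.contains c)
        (names.foldl (fun ch n => if ¬ ch.contains n ∧ ch.length < 5 then ch ++ [n] else ch) chosen).take 5) =
       (PySem.List.sorted (PySem.List.dedup (cols.map (fun c => ((PySem.Dict.mk c).get? "name").getD "")))
          (fun n => pvKey n) false).take 5
  set N := cols.map (fun c => ((PySem.Dict.mk c).get? "name").getD "")
  simp only []
  have hnodup : (PySem.List.dedup N).Nodup := PySem.List.nodup_dedup N
  rw [sorted_key_eq _ hnodup, loopA_eq_add]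
  obtain ⟨E, hE2, hE1⟩ := foldl_add_sim N (pvPriority.filter (fun c => N.contains c)) []
    (fun y => pvPriority.contains y)
    (by intro y hy; simp [List.mem_filter, hy])
  have hEd : PySem.List.dedup N = E := by
    simpa [PySem.List.dedup, PySem.Set.ofList, PySem.Set.empty] using hE2
  rw [hE1, ← hEd]
  have hfc : List.filter (fun c => N.contains c) pvPriority =
      List.filter (fun p => (PySem.List.dedup N).contains p) pvPriority :=
    List.filter_congr (fun p _ => Bool.coe_iff_coe.mp (by simp))
  rw [hfc]

-- ===== VERDICT (by name: the statement is the Claim_ definition above) =====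
theorem pick_display_fields_spec : Claim_equal_pick_display_fields := by
  intro cols _ _
  show pick_display_fields cols = pick_display_fields_alt cols
  exact pick_eq_alt cols
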